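-- pv_equiv track=rewrite | github.com/demethan/Poker-Game-Organizer | app.py | seat_assignment
-- ===== SOURCE A (Python) =====
-- from typing import Optional
--
-- def table_sizes(total_players: int, multiple_tables: bool = False) -> list:
--     if total_players <= 0:
--         return []
--     if not multiple_tables:
--         return [total_players]
--     if total_players <= 9:
--         return [total_players]
--     table_count = (total_players + 8) // 9
--     base = total_players // table_count
--     remainder = total_players % table_count
--     return [base + 1 if idx < remainder else base for idx in range(table_count)]
--
-- def table_labels(count: int) -> list:
--     labels = []
--     alphabet = "ABCDEFGHIJKLMNOPQRSTUVWXYZ"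
--     for idx in range(count):
--         n = idx
--         label = ""
--         while True:
--             label = alphabet[n % 26] + label
--             n = n // 26 - 1
--             if n < 0:
--                 break
--         labels.append(label)
--     return labels
--
-- def seat_assignment(seat_number: Optional[int], total_players: int, multiple_tables: bool = False) -> tuple[Optional[str], Optional[int]]:
--     if not seat_number or total_players <= 0:
--         return None, None
--     sizes = table_sizes(total_players, multiple_tables)
--     labels = table_labels(len(sizes))
--     idx = seat_number - 1
--     for label, size in zip(labels, sizes):
--         if idx < size:
--             return label, idx + 1
--         idx -= size
--     return None, None
-- ===== SOURCE B (Python) =====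
-- from typing import Optional
--
-- def _label(n: int) -> str:
--     # base-26 bijective label of table index n (0 -> 'A', 25 -> 'Z', 26 -> 'AA', ...)
--     q = n // 26 - 1
--     ch = chr(65 + n % 26)
--     return ch if q < 0 else _label(q) + ch
--
-- def seat_assignment(seat_number: Optional[int], total_players: int, multiple_tables: bool = False) -> tuple[Optional[str], Optional[int]]:
--     if seat_number is None or seat_number < 1 or total_players <= 0:
--         return None, None
--     idx = seat_number - 1
--     if not multiple_tables or total_players <= 9:
--         return ("A", idx + 1) if idx < total_players else (None, None)
--     if idx >= total_players:
--         return None, None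
--     table_count = (total_players + 8) // 9
--     base = total_players // table_count
--     rem = total_players % table_count
--     # first `rem` tables hold base+1 players, the rest hold base
--     if idx < rem * (base + 1):
--         t = idx // (base + 1)
--         local = idx % (base + 1)
--     else:
--         off = idx - rem * (base + 1)
--         t = rem + off // base
--         local = off % base
--     return _label(t), local + 1
-- ===== Notes on version B (the rewrite author's own statement) =====
-- stated objective: faster
-- what changed: B computes the table index and local seat directly by floor division/remainder and builds a single base-26 label, instead of materialising the whole size list and label list and scanning through the tables one by one; for seat_number < 1 it returns (None, None) like for seat 0.
-- intended difference: For negative seat_number with total_players > 0, A falls into the first table and returns ('A', seat_number) with a nonsensical negative local seat; B returns (None, None) as for seat 0 or an out-of-range seat, which is the intended behaviour for an invalid seat number. — e.g. on seat_assignment(some (-5), 30, true): A returns (some "A", some (-5)), B returns (none, none)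
import Mathlib
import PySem

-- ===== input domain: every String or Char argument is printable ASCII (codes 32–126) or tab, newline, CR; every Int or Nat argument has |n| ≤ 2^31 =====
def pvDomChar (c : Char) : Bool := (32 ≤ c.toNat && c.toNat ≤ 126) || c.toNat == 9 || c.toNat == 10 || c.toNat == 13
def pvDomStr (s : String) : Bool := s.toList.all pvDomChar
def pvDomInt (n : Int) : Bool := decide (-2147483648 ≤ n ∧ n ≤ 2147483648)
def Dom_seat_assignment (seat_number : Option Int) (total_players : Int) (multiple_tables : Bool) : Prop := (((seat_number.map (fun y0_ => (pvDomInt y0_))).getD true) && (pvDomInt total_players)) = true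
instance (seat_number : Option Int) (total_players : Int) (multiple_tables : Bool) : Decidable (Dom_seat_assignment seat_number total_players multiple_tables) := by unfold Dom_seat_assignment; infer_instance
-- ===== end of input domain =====

-- B replaces A's build-all-tables-and-scan with direct floor-division arithmetic and a single
-- base-26 label (asymptotically faster in total_players); for negative seat_number (D_ below)
-- A returns ('A', seat_number) with a nonsensical negative local seat while B returns (none, none).


-- ===== PORT A =====
-- alphabet = "ABCDEFGHIJKLMNOPQRSTUVWXYZ", kept as a char list (string facts are proved on the list side)
def pvAlphabet : List Char :=
  ['A','B','C','D','E','F','G','H','I','J','K','L','M','N','O','P','Q','R','S','T','U','V','W','X','Y','Z']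

-- inner `while True` of table_labels; n is the Python loop variable, which is ≥ 0 at every
-- iteration entry, so it is carried as a Nat; Python's exit test `n // 26 - 1 < 0` is `n < 26`
-- for n ≥ 0, and `alphabet[n % 26]` is always in range (n % 26 < 26).
def pvLabelLoopA (n : Nat) (label : List Char) : List Char :=
  let label' := [pvAlphabet.getD (n % 26) ' '] ++ label
  if n < 26 then label' else pvLabelLoopA (n / 26 - 1) label'
termination_by n
decreasing_by
  have : n / 26 < n := Nat.div_lt_self (by omega) (by omega)
  omega

def pvTableSizes (total_players : Int) (multiple_tables : Bool) : List Int :=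
  if total_players ≤ 0 then []
  else if !multiple_tables then [total_players]
  else if total_players ≤ 9 then [total_players]
  else
    let table_count := PySem.Int.floordiv (total_players + 8) 9
    let base := PySem.Int.floordiv total_players table_count
    let remainder := PySem.Int.mod total_players table_count
    (PySem.List.pyRange 0 table_count 1).map (fun idx => if idx < remainder then base + 1 else base)

-- table_labels(count): loop variable idx runs over range(count), hence ≥ 0, so idx.toNat = idx
def pvTableLabels (count : Int) : List String :=
  (PySem.List.pyRange 0 count 1).map (fun idx => String.ofList (pvLabelLoopA idx.toNat []))

-- the `for label, size in zip(labels, sizes)` loop of seat_assignment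
def pvSeatLoop : List (String × Int) → Int → Option String × Option Int
  | [], _ => (none, none)
  | (label, size) :: rest, idx =>
    if idx < size then (some label, some (idx + 1)) else pvSeatLoop rest (idx - size)

def seat_assignment (seat_number : Option Int) (total_players : Int) (multiple_tables : Bool) : Option String × Option Int :=
  match seat_number with
  | none => (none, none)           -- `not seat_number` is true for None
  | some s =>
    if s = 0 ∨ total_players ≤ 0 then (none, none)   -- `not seat_number` is true for 0
    else
      let sizes := pvTableSizes total_players multiple_tables
      let labels := pvTableLabels (sizes.length : Int)
      pvSeatLoop (labels.zip sizes) (s - 1)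

-- ===== PORT B =====
-- _label(n): recursive base-26 bijective label; n ≥ 0 at every call, carried as a Nat
def pvLabelB (n : Nat) : List Char :=
  let ch := Char.ofNat (65 + n % 26)
  if n < 26 then [ch] else pvLabelB (n / 26 - 1) ++ [ch]
termination_by n
decreasing_by
  have : n / 26 < n := Nat.div_lt_self (by omega) (by omega)
  omega

def seat_assignment_alt (seat_number : Option Int) (total_players : Int) (multiple_tables : Bool) : Option String × Option Int :=
  match seat_number with
  | none => (none, none)
  | some s =>
    if s < 1 ∨ total_players ≤ 0 then (none, none)
    else
      let idx := s - 1
      if !multiple_tables || total_players ≤ 9 then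
        if idx < total_players then (some "A", some (idx + 1)) else (none, none)
      else if total_players ≤ idx then (none, none)
      else
        let table_count := PySem.Int.floordiv (total_players + 8) 9
        let base := PySem.Int.floordiv total_players table_count
        let rem := PySem.Int.mod total_players table_count
        if idx < rem * (base + 1) then
          (some (String.ofList (pvLabelB (PySem.Int.floordiv idx (base + 1)).toNat)),
           some (PySem.Int.mod idx (base + 1) + 1))
        else
          let off := idx - rem * (base + 1)
          (some (String.ofList (pvLabelB (rem + PySem.Int.floordiv off base).toNat)),
           some (PySem.Int.mod off base + 1))

-- ===== PRECONDITION & SPEC =====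
-- For negative seat_number with total_players > 0, A falls into the first table and returns
-- ('A', seat_number) with a nonsensical negative local seat; B returns (none, none) as for
-- seat 0 or an out-of-range seat, which is the intended behaviour for an invalid seat number.
def D_seat_assignment (seat_number : Option Int) (total_players : Int) (multiple_tables : Bool) : Prop :=
  seat_number.getD 0 < 0 ∧ 0 < total_players
instance (seat_number : Option Int) (total_players : Int) (multiple_tables : Bool) : Decidable (D_seat_assignment seat_number total_players multiple_tables) := by unfold D_seat_assignment; infer_instance

def Spec_seat_assignment (seat_number : Option Int) (total_players : Int) (multiple_tables : Bool) (out : Option String × Option Int) : Prop := ¬ D_seat_assignment seat_number total_players multiple_tables → out = seat_assignment_alt seat_number total_players multiple_tables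
instance (seat_number : Option Int) (total_players : Int) (multiple_tables : Bool) (out : Option String × Option Int) : Decidable (Spec_seat_assignment seat_number total_players multiple_tables out) := by unfold Spec_seat_assignment; infer_instance

def pvDiffWitness_seat_assignment : Option Int × Int × Bool := (some (-5), 30, true)
def pvDiffWitnessOut_seat_assignment : (Option String × Option Int) × (Option String × Option Int) :=
  ((some "A", some (-5)), (none, none))

-- ===== CLAIM (what is proved, stated in full; the proofs are below) =====
def Claim_unchanged_seat_assignment : Prop := ∀ (seat_number : Option Int) (total_players : Int) (multiple_tables : Bool), Dom_seat_assignment seat_number total_players multiple_tables → Spec_seat_assignment seat_number total_players multiple_tables (seat_assignment seat_number total_players multiple_tables)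
def Claim_changed_seat_assignment : Prop := Dom_seat_assignment (pvDiffWitness_seat_assignment.1) (pvDiffWitness_seat_assignment.2.1) (pvDiffWitness_seat_assignment.2.2) ∧ D_seat_assignment (pvDiffWitness_seat_assignment.1) (pvDiffWitness_seat_assignment.2.1) (pvDiffWitness_seat_assignment.2.2) ∧ seat_assignment (pvDiffWitness_seat_assignment.1) (pvDiffWitness_seat_assignment.2.1) (pvDiffWitness_seat_assignment.2.2) = pvDiffWitnessOut_seat_assignment.1 ∧ seat_assignment_alt (pvDiffWitness_seat_assignment.1) (pvDiffWitness_seat_assignment.2.1) (pvDiffWitness_seat_assignment.2.2) = pvDiffWitnessOut_seat_assignment.2 ∧ pvDiffWitnessOut_seat_assignment.1 ≠ pvDiffWitnessOut_seat_assignment.2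
def Claim_exact_seat_assignment : Prop := ∀ (seat_number : Option Int) (total_players : Int) (multiple_tables : Bool), Dom_seat_assignment seat_number total_players multiple_tables → D_seat_assignment seat_number total_players multiple_tables → seat_assignment seat_number total_players multiple_tables ≠ seat_assignment_alt seat_number total_players multiple_tables

-- ===== LEMMAS AND PROOFS =====

-- the two label builders agree
lemma labelA_eq_labelB (n : Nat) : ∀ acc, pvLabelLoopA n acc = pvLabelB n ++ acc := by
  induction n using Nat.strong_induction_on with
  | _ n ih =>
    intro acc
    have hch : pvAlphabet[n % 26]?.getD ' ' = Char.ofNat (65 + n % 26) := by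
      have h26 : ∀ k, k < 26 → pvAlphabet[k]?.getD ' ' = Char.ofNat (65 + k) := by decide
      exact h26 _ (Nat.mod_lt _ (by omega))
    rw [pvLabelLoopA, pvLabelB]
    by_cases h : n < 26
    · simp [h, hch]
    · have hlt : n / 26 - 1 < n := by
        have : n / 26 < n := Nat.div_lt_self (by omega) (by omega)
        omega
      simp only [h, if_false, ih _ hlt]
      simp [hch]

-- cumulative number of seats before table j (0 ≤ j), for first-`rem` tables of size base+1
def pvOff (base rem j : Int) : Int := j * base + min j rem

lemma pvOff_succ (base rem j : Int) :
    pvOff base rem (j+1) - pvOff base rem j = (if j < rem then base + 1 else base) := by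
  unfold pvOff
  have hm : (j+1)*base = j*base + base := by ring
  split <;> omega

lemma pvOff_mono {base rem : Int} (hb : 0 ≤ base) {j t : Int} (h : j ≤ t) :
    pvOff base rem j ≤ pvOff base rem t := by
  unfold pvOff
  have := mul_le_mul_of_nonneg_right h hb
  omega

-- the scan hits table t when pvOff t - pvOff j ≤ idx < pvOff (t+1) - pvOff j
lemma pvSeatLoop_hit (base rem tc : Int) (lab : Int → String) (hb : 1 ≤ base) :
    ∀ (k : Nat) (j t idx : Int), (tc - j).toNat = k → j ≤ t → t < tc →
    pvOff base rem t - pvOff base rem j ≤ idx → idx < pvOff base rem (t+1) - pvOff base rem j →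
    pvSeatLoop ((PySem.List.pyRange j tc 1).map
        (fun i => (lab i, if i < rem then base + 1 else base))) idx
      = (some (lab t), some (idx - (pvOff base rem t - pvOff base rem j) + 1)) := by
  intro k
  induction k with
  | zero => intro j t idx hk hjt htc _ _; omega
  | succ k ih =>
    intro j t idx hk hjt htc h1 h2
    have hjtc : j < tc := by omega
    rw [PySem.List.pyRange_one_cons hjtc, List.map_cons, pvSeatLoop]
    have hsz : (if j < rem then base + 1 else base) = pvOff base rem (j+1) - pvOff base rem j :=
      (pvOff_succ base rem j).symm
    by_cases hteq : t = j
    · subst hteq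
      have : idx < (if t < rem then base + 1 else base) := by rw [hsz]; omega
      simp only [this, if_true]
      have : pvOff base rem t - pvOff base rem t = 0 := by omega
      rw [this]; ring_nf
    · have hjt' : j + 1 ≤ t := by omega
      have hmono := pvOff_mono (base := base) (rem := rem) (by omega) hjt'
      have hnot : ¬ idx < (if j < rem then base + 1 else base) := by rw [hsz]; omega
      simp only [hnot, if_false]
      have := ih (j+1) t (idx - (pvOff base rem (j+1) - pvOff base rem j))
        (by omega) hjt' htc (by omega) (by omega)
      rw [← hsz] at this
      rw [this]
      congr 2
      omega

lemma pvSeatLoop_miss (base rem tc : Int) (lab : Int → String) (hb : 1 ≤ base) :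
    ∀ (k : Nat) (j idx : Int), (tc - j).toNat = k → j ≤ tc →
    pvOff base rem tc - pvOff base rem j ≤ idx →
    pvSeatLoop ((PySem.List.pyRange j tc 1).map
        (fun i => (lab i, if i < rem then base + 1 else base))) idx = (none, none) := by
  intro k
  induction k with
  | zero =>
    intro j idx hk hj _
    have : tc ≤ j := by omega
    rw [PySem.List.pyRange_one_eq_nil this]
    rfl
  | succ k ih =>
    intro j idx hk hj h1
    have hjtc : j < tc := by omega
    rw [PySem.List.pyRange_one_cons hjtc, List.map_cons, pvSeatLoop]
    have hsz : (if j < rem then base + 1 else base) = pvOff base rem (j+1) - pvOff base rem j :=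
      (pvOff_succ base rem j).symm
    have hmono := pvOff_mono (base := base) (rem := rem) (by omega) (show j+1 ≤ tc by omega)
    have hnot : ¬ idx < (if j < rem then base + 1 else base) := by rw [hsz]; omega
    simp only [hnot, if_false]
    exact ih (j+1) (idx - (if j < rem then base + 1 else base))
      (by omega) (by omega) (by rw [hsz]; omega)

lemma pvLabelLoopA_zero : pvLabelLoopA 0 [] = ['A'] := by
  unfold pvLabelLoopA; decide

lemma pvTableLabels_one : pvTableLabels 1 = ["A"] := by
  unfold pvTableLabels
  rw [show PySem.List.pyRange 0 1 1 = [0] from by decide]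
  simp [pvLabelLoopA_zero]

-- the single-table case: not multiple_tables, or at most 9 players
lemma pv_small_case (s tp : Int) (mt : Bool) (hs : 1 ≤ s) (htp : 0 < tp)
    (hsmall : mt = false ∨ tp ≤ 9) :
    seat_assignment (some s) tp mt = seat_assignment_alt (some s) tp mt := by
  have hsizes : pvTableSizes tp mt = [tp] := by
    unfold pvTableSizes
    rw [if_neg (by omega)]
    rcases hsmall with h | h
    · subst h; simp
    · rcases mt with _ | _
      · simp
      · simp [h]
  have hcond : (!mt || decide (tp ≤ 9)) = true := by
    rcases hsmall with h | h <;> simp [h]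
  simp only [seat_assignment, seat_assignment_alt]
  rw [if_neg (by omega : ¬(s = 0 ∨ tp ≤ 0)), if_neg (by omega : ¬(s < 1 ∨ tp ≤ 0))]
  simp only [hsizes, hcond, List.length_cons, List.length_nil]
  rw [if_pos trivial]
  norm_num
  rw [pvTableLabels_one]
  by_cases h : s - 1 < tp <;> simp [pvSeatLoop, h] <;> omega

-- the multi-table case: multiple_tables with at least 10 players
lemma pv_big_case (s tp : Int) (hs : 1 ≤ s) (htp : 10 ≤ tp) :
    seat_assignment (some s) tp true = seat_assignment_alt (some s) tp true := by
  have htc9 : PySem.Int.floordiv (tp + 8) 9 = (tp + 8) / 9 :=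
    PySem.Int.floordiv_eq_ediv_of_pos (by omega)
  set tc := PySem.Int.floordiv (tp + 8) 9 with htcdef
  have htc2 : 2 ≤ tc := by omega
  have htcle : tc ≤ tp := by omega
  set base := PySem.Int.floordiv tp tc with hbasedef
  set rem := PySem.Int.mod tp tc with hremdef
  have hsum : base * tc + rem = tp := PySem.Int.floordiv_mul_add_mod tp tc
  have hrem0 : 0 ≤ rem := PySem.Int.mod_nonneg tp (by omega)
  have hremlt : rem < tc := PySem.Int.mod_lt tp (by omega)
  have hbase1 : 1 ≤ base := by
    rw [hbasedef]
    rw [PySem.Int.le_floordiv_iff_mul_le (by omega)]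
    omega
  have hsizes : pvTableSizes tp true =
      (PySem.List.pyRange 0 tc 1).map (fun i => if i < rem then base + 1 else base) := by
    unfold pvTableSizes
    rw [if_neg (by omega : ¬tp ≤ 0)]
    simp only [Bool.not_true]
    rw [if_neg (by simp), if_neg (by omega : ¬tp ≤ 9)]
  have hlen : (((pvTableSizes tp true).length : Nat) : Int) = tc := by
    rw [hsizes, List.length_map, PySem.List.length_pyRange_one]
    omega
  have hA : seat_assignment (some s) tp true =
      pvSeatLoop ((PySem.List.pyRange 0 tc 1).map
        (fun i => (String.ofList (pvLabelLoopA i.toNat []), if i < rem then base + 1 else base)))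
        (s - 1) := by
    simp only [seat_assignment]
    rw [if_neg (by omega : ¬(s = 0 ∨ tp ≤ 0))]
    rw [show pvTableLabels ((pvTableSizes tp true).length : Int)
          = (PySem.List.pyRange 0 tc 1).map (fun i => String.ofList (pvLabelLoopA i.toNat [])) from by
        unfold pvTableLabels; rw [hlen]]
    rw [hsizes, List.zip_map']
  have hB : seat_assignment_alt (some s) tp true =
      (if tp ≤ s - 1 then ((none : Option String), (none : Option Int))
       else if s - 1 < rem * (base + 1) then
        (some (String.ofList (pvLabelB (PySem.Int.floordiv (s-1) (base + 1)).toNat)),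
         some (PySem.Int.mod (s-1) (base + 1) + 1))
       else
        (some (String.ofList (pvLabelB (rem + PySem.Int.floordiv (s - 1 - rem * (base + 1)) base).toNat)),
         some (PySem.Int.mod (s - 1 - rem * (base + 1)) base + 1))) := by
    simp only [seat_assignment_alt]
    rw [if_neg (by omega : ¬(s < 1 ∨ tp ≤ 0))]
    rw [if_neg (by simp; omega : ¬((!true || decide (tp ≤ 9)) = true))]
  rw [hA, hB]
  by_cases hout : tp ≤ s - 1
  · rw [if_pos hout]
    refine pvSeatLoop_miss base rem tc _ hbase1 tc.toNat 0 (s-1) (by omega) (by omega) ?_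
    have h1 : min tc rem = rem := by omega
    have h2 : min (0:Int) rem = 0 := by omega
    have h3 : tc * base = base * tc := by ring
    unfold pvOff; omega
  · rw [if_neg hout]
    by_cases hfirst : s - 1 < rem * (base + 1)
    · rw [if_pos hfirst]
      set t := PySem.Int.floordiv (s-1) (base+1) with htdef
      have hlow : t * (base+1) ≤ s - 1 := by
        rw [htdef] at *
        exact (PySem.Int.le_floordiv_iff_mul_le (by omega)).mp le_rfl
      have hhigh : s - 1 < (t+1) * (base+1) := by
        rw [htdef] at *
        exact (PySem.Int.floordiv_lt_iff_lt_mul (by omega)).mp (lt_add_one _)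
      have htrem : t < rem := by
        rw [htdef] at *
        exact (PySem.Int.floordiv_lt_iff_lt_mul (by omega)).mpr hfirst
      have ht0 : 0 ≤ t := by
        have h3 : (0:Int) * (base+1) ≤ s - 1 := by omega
        rw [htdef] at *
        exact (PySem.Int.le_floordiv_iff_mul_le (by omega)).mpr h3
      have hmod : PySem.Int.mod (s-1) (base+1) = s - 1 - t * (base+1) := by
        have := PySem.Int.floordiv_mul_add_mod (s-1) (base+1)
        rw [← htdef] at this; omega
      have hofft : pvOff base rem t - pvOff base rem 0 = t * (base+1) := by
        have h1 : min t rem = t := by omega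
        have h2 : min (0:Int) rem = 0 := by omega
        have h3 : t * (base+1) = t * base + t := by ring
        unfold pvOff; omega
      have hofft1 : pvOff base rem (t+1) - pvOff base rem 0 = (t+1) * (base+1) := by
        have h1 : min (t+1) rem = t+1 := by omega
        have h2 : min (0:Int) rem = 0 := by omega
        have h3 : (t+1) * (base+1) = (t+1) * base + (t+1) := by ring
        unfold pvOff; omega
      rw [pvSeatLoop_hit base rem tc _ hbase1 tc.toNat 0 t (s-1) (by omega) ht0 (by omega)
        (by omega) (by omega)]
      rw [Prod.mk.injEq]
      constructor
      · show some (String.ofList (pvLabelLoopA t.toNat [])) = _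
        rw [labelA_eq_labelB, List.append_nil]
      · show some (s - 1 - (pvOff base rem t - pvOff base rem 0) + 1) = _
        rw [hofft]; congr 1; omega
    · rw [if_neg hfirst]
      set o := s - 1 - rem * (base + 1) with hodef
      have ho0 : 0 ≤ o := by omega
      set q := PySem.Int.floordiv o base with hqdef
      have hlow : q * base ≤ o := by
        rw [hqdef] at *
        exact (PySem.Int.le_floordiv_iff_mul_le (by omega)).mp le_rfl
      have hhigh : o < (q+1) * base := by
        rw [hqdef] at *
        exact (PySem.Int.floordiv_lt_iff_lt_mul (by omega)).mp (lt_add_one _)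
      have hq0 : 0 ≤ q := by
        have h3 : (0:Int) * base ≤ o := by omega
        rw [hqdef] at *
        exact (PySem.Int.le_floordiv_iff_mul_le (by omega)).mpr h3
      have hq : q < tc - rem := by
        have hring : (tc - rem) * base = base * tc - rem * base := by ring
        have hring2 : rem * (base + 1) = rem * base + rem := by ring
        have holt : o < (tc - rem) * base := by omega
        rw [hqdef] at *
        exact (PySem.Int.floordiv_lt_iff_lt_mul (by omega)).mpr holt
      have hmod : PySem.Int.mod o base = o - q * base := by
        have := PySem.Int.floordiv_mul_add_mod o base
        rw [← hqdef] at this; omega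
      have hofft : pvOff base rem (rem + q) - pvOff base rem 0 = rem * (base+1) + q * base := by
        have h1 : min (rem + q) rem = rem := by omega
        have h2 : min (0:Int) rem = 0 := by omega
        have h3 : (rem + q) * base = rem * base + q * base := by ring
        have h4 : rem * (base+1) = rem * base + rem := by ring
        unfold pvOff; omega
      have hofft1 : pvOff base rem (rem + q + 1) - pvOff base rem 0
          = rem * (base+1) + (q+1) * base := by
        have h1 : min (rem + q + 1) rem = rem := by omega
        have h2 : min (0:Int) rem = 0 := by omega
        have h3 : (rem + q + 1) * base = rem * base + q * base + base := by ring
        have h4 : rem * (base+1) = rem * base + rem := by ring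
        have h5 : (q+1) * base = q * base + base := by ring
        unfold pvOff; omega
      rw [pvSeatLoop_hit base rem tc _ hbase1 tc.toNat 0 (rem + q) (s-1) (by omega)
        (by omega) (by omega) (by omega) (by omega)]
      rw [Prod.mk.injEq]
      constructor
      · show some (String.ofList (pvLabelLoopA (rem + q).toNat [])) = _
        rw [labelA_eq_labelB, List.append_nil]
      · show some (s - 1 - (pvOff base rem (rem + q) - pvOff base rem 0) + 1) = _
        rw [hofft]; congr 1; omega

-- inside D_ (negative seat number, positive player count) A lands in the first table
lemma pvA_neg (s tp : Int) (mt : Bool) (hs : s < 0) (htp : 0 < tp) :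
    seat_assignment (some s) tp mt = (some "A", some s) := by
  by_cases hsmall : mt = false ∨ tp ≤ 9
  · have hsizes : pvTableSizes tp mt = [tp] := by
      unfold pvTableSizes
      rw [if_neg (by omega)]
      rcases hsmall with h | h
      · subst h; simp
      · rcases mt with _ | _
        · simp
        · simp [h]
    simp only [seat_assignment]
    rw [if_neg (by omega : ¬(s = 0 ∨ tp ≤ 0))]
    simp only [hsizes, List.length_cons, List.length_nil]
    norm_num
    rw [pvTableLabels_one]
    simp [pvSeatLoop, show s - 1 < tp by omega, show s - 1 + 1 = s by omega]
  · push Not at hsmall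
    obtain ⟨hmt, htp9⟩ := hsmall
    have hmt' : mt = true := by rcases mt with _ | _ <;> simp_all
    subst hmt'
    have htc9 : PySem.Int.floordiv (tp + 8) 9 = (tp + 8) / 9 :=
      PySem.Int.floordiv_eq_ediv_of_pos (by omega)
    set tc := PySem.Int.floordiv (tp + 8) 9 with htcdef
    have htc2 : 2 ≤ tc := by omega
    set base := PySem.Int.floordiv tp tc with hbasedef
    set rem := PySem.Int.mod tp tc with hremdef
    have hbase1 : 1 ≤ base := by
      rw [hbasedef, PySem.Int.le_floordiv_iff_mul_le (by omega)]
      omega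
    have hsizes : pvTableSizes tp true =
        (PySem.List.pyRange 0 tc 1).map (fun i => if i < rem then base + 1 else base) := by
      unfold pvTableSizes
      rw [if_neg (by omega : ¬tp ≤ 0)]
      simp only [Bool.not_true]
      rw [if_neg (by simp), if_neg (by omega : ¬tp ≤ 9)]
    have hlen : (((pvTableSizes tp true).length : Nat) : Int) = tc := by
      rw [hsizes, List.length_map, PySem.List.length_pyRange_one]
      omega
    simp only [seat_assignment]
    rw [if_neg (by omega : ¬(s = 0 ∨ tp ≤ 0))]
    rw [show pvTableLabels ((pvTableSizes tp true).length : Int)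
          = (PySem.List.pyRange 0 tc 1).map (fun i => String.ofList (pvLabelLoopA i.toNat [])) from by
        unfold pvTableLabels; rw [hlen]]
    rw [hsizes, List.zip_map', PySem.List.pyRange_one_cons (by omega : (0:Int) < tc),
      List.map_cons, pvSeatLoop]
    rw [if_pos (by split <;> omega : s - 1 < if (0:Int) < rem then base + 1 else base)]
    rw [show ((0:Int).toNat) = 0 from rfl, pvLabelLoopA_zero]
    simp [show s - 1 + 1 = s by omega]

-- ===== VERDICT (by name: the statement is the Claim_ definition above) =====
theorem seat_assignment_spec : Claim_unchanged_seat_assignment := by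
  intro sn tp mt _ hnd
  cases sn with
  | none => rfl
  | some s =>
    by_cases htp : tp ≤ 0
    · simp only [seat_assignment, seat_assignment_alt]
      rw [if_pos (Or.inr htp), if_pos (Or.inr htp)]
    · by_cases hs0 : s = 0
      · subst hs0
        simp only [seat_assignment, seat_assignment_alt]
        rw [if_pos (Or.inl trivial), if_pos (Or.inl (by omega : (0:Int) < 1))]
      have hs : 1 ≤ s := by
        by_contra h
        exact hnd ⟨by simp; omega, by omega⟩
      by_cases hsmall : mt = false ∨ tp ≤ 9
      · exact pv_small_case s tp mt hs (by omega) hsmall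
      · push Not at hsmall
        have hmt : mt = true := by rcases mt with _ | _ <;> simp_all
        subst hmt
        exact pv_big_case s tp hs (by omega)

theorem seat_assignment_changed : Claim_changed_seat_assignment := by
  unfold Claim_changed_seat_assignment
  refine ⟨by decide, by decide, ?_, by decide, by decide⟩
  show seat_assignment (some (-5)) 30 true = (some "A", some (-5))
  exact pvA_neg (-5) 30 true (by omega) (by omega)

theorem seat_assignment_tight : Claim_exact_seat_assignment := by
  intro sn tp mt _ hd
  obtain ⟨hneg, htp⟩ := hd
  cases sn with
  | none => simp at hneg
  | some s =>
    have hs : s < 0 := by simpa using hneg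
    rw [pvA_neg s tp mt hs htp]
    simp only [seat_assignment_alt]
    rw [if_pos (Or.inl (by omega : s < 1))]
    simp
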